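-- pv_equiv track=rewrite | github.com/saint1729/coursera | data-structures-algorithms/Algorithmic Toolbox/Greedy Algorithms/Car Fueling/car_fueling.py | compute_min_number_of_refills
-- ===== SOURCE A (Python) =====
-- def compute_min_number_of_refills(d, m, stops):
--     assert 1 <= d <= 10 ** 5
--     assert 1 <= m <= 400
--     assert 1 <= len(stops) <= 300
--     assert 0 < stops[0] and all(stops[i] < stops[i + 1] for i in range(len(stops) - 1)) and stops[-1] < d
--
--     fuel = m
--
--     stops.insert(0, 0)
--     stops.append(d)
--     minimum_stops, prev, curr, distance_covered, n = -1, 0, 1, 0, len(stops)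
--
--     while curr < n:
--         while (fuel >= 0) and (curr < n):
--             fuel -= (stops[curr] - stops[curr - 1])
--             curr += 1
--         if (fuel < 0) and (curr == (prev + 1)):
--             return -1
--         elif fuel < 0:
--             curr -= 1
--         fuel = m
--         prev = curr
--         minimum_stops += 1
--
--     return minimum_stops
-- ===== SOURCE B (Python) =====
-- # Single-pass greedy over consecutive gaps (refill on demand) instead of A's
-- # nested overshoot-and-back-off loops; same in-place mutation of stops as A.
-- def compute_min_number_of_refills(d, m, stops):
--     assert 1 <= d <= 10 ** 5
--     assert 1 <= m <= 400
--     assert 1 <= len(stops) <= 300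
--     assert 0 < stops[0] and all(stops[i] < stops[i + 1] for i in range(len(stops) - 1)) and stops[-1] < d
--
--     stops.insert(0, 0)
--     stops.append(d)
--     n = len(stops)
--
--     refills = 0
--     fuel = m
--     for i in range(1, n):
--         gap = stops[i] - stops[i - 1]
--         if fuel < gap:
--             if m < gap:
--                 return -1
--             refills += 1
--             fuel = m - gap
--         else:
--             fuel -= gap
--     return refills
-- ===== Notes on version B (the rewrite author's own statement) =====
-- stated objective: simpler
-- what changed: A's nested overshoot-and-back-off while loops (advance until fuel goes negative, then step back, refill and re-drive the gap) are replaced by a single forward pass over consecutive gaps that refills on demand before a gap the current tank cannot cover; Pre_ excludes exactly the inputs A's asserts reject (AssertionError/IndexError).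
import Mathlib
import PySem

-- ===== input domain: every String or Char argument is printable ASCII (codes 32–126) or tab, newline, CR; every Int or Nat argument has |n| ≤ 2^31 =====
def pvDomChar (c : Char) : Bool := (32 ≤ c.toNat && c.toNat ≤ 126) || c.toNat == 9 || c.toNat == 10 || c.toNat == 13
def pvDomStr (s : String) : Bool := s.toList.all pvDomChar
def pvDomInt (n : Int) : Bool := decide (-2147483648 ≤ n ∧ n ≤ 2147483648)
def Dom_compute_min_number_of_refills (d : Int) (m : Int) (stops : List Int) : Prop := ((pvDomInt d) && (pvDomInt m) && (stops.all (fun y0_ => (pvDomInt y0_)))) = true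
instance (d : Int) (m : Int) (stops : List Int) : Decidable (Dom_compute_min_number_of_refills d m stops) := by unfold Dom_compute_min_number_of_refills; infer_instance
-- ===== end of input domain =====

-- B replaces A's nested overshoot-and-back-off loops by one forward pass over the gaps
-- that refills on demand (objective: simpler).  Both Pythons mutate `stops` in place
-- identically (insert 0 at the front, append d); the theorems are about the return value.

-- ===== PORT A =====
-- total indexing helper: Python indexing here is always in range inside Pre_
def pvIdx (p : List Int) (i : Int) : Int := (PySem.List.pyGet? p i).getD 0

-- A's inner `while (fuel >= 0) and (curr < n)` loop; fuel-counter recursion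
-- (the counter passed by aOuter is more than the loop's step count inside Pre_)
def aInner (p : List Int) (n : Int) : Nat → Int → Int → Int × Int
  | 0, gas, curr => (gas, curr)
  | fi + 1, gas, curr =>
    if 0 ≤ gas ∧ curr < n then
      aInner p n fi (gas - (pvIdx p curr - pvIdx p (curr - 1))) (curr + 1)
    else (gas, curr)

-- A's outer `while curr < n` loop; fuel-counter recursion, ample inside Pre_
def aOuter (p : List Int) (n m : Int) : Nat → Int → Int → Int → Int
  | 0, _, _, mstops => mstops
  | fo + 1, prev, curr, mstops =>
    if curr < n then
      let gc := aInner p n (p.length + 1) m curr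
      if gc.1 < 0 ∧ gc.2 = prev + 1 then -1
      else
        aOuter p n m fo (if gc.1 < 0 then gc.2 - 1 else gc.2)
          (if gc.1 < 0 then gc.2 - 1 else gc.2) (mstops + 1)
    else mstops

def compute_min_number_of_refills (d : Int) (m : Int) (stops : List Int) : Int :=
  let p := 0 :: (stops ++ [d])
  aOuter p (p.length : Int) m (p.length + 2) 0 1 (-1)

-- ===== PORT B =====
-- B's single `for i in range(1, n)` loop: counter k counts remaining iterations
def bLoop (p : List Int) (m : Int) : Nat → Int → Int → Int → Int
  | 0, _, _, refills => refills
  | k + 1, i, fuel, refills =>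
    let gap := pvIdx p i - pvIdx p (i - 1)
    if fuel < gap then
      if m < gap then -1
      else bLoop p m k (i + 1) (m - gap) (refills + 1)
    else bLoop p m k (i + 1) (fuel - gap) refills

def compute_min_number_of_refills_alt (d : Int) (m : Int) (stops : List Int) : Int :=
  let p := 0 :: (stops ++ [d])
  bLoop p m (p.length - 1) 1 m 0

-- ===== PRECONDITION & SPEC =====
-- Pre_ = exactly A's asserts (A raises AssertionError otherwise; stops = [] would also
-- raise IndexError at stops[0]): bounds on d, m and the length, stops strictly
-- increasing, positive, and below d.
def Pre_compute_min_number_of_refills (d : Int) (m : Int) (stops : List Int) : Prop :=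
  1 ≤ d ∧ d ≤ 100000 ∧ 1 ≤ m ∧ m ≤ 400 ∧ 1 ≤ stops.length ∧ stops.length ≤ 300 ∧
  0 < stops.headD 0 ∧ List.IsChain (· < ·) stops ∧ stops.getLastD 0 < d

instance (d : Int) (m : Int) (stops : List Int) : Decidable (Pre_compute_min_number_of_refills d m stops) := by
  unfold Pre_compute_min_number_of_refills; infer_instance

def pvWitness_compute_min_number_of_refills : Int × Int × List Int := (10, 4, [3, 6])

def Spec_compute_min_number_of_refills (d : Int) (m : Int) (stops : List Int) (out : Int) : Prop := out = compute_min_number_of_refills_alt d m stops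
instance (d : Int) (m : Int) (stops : List Int) (out : Int) : Decidable (Spec_compute_min_number_of_refills d m stops out) := by unfold Spec_compute_min_number_of_refills; infer_instance

-- ===== CLAIM (what is proved, stated in full; the proofs are below) =====
def Claim_equal_compute_min_number_of_refills : Prop := ∀ (d : Int) (m : Int) (stops : List Int), Dom_compute_min_number_of_refills d m stops → Pre_compute_min_number_of_refills d m stops → Spec_compute_min_number_of_refills d m stops (compute_min_number_of_refills d m stops)

-- ===== LEMMAS AND PROOFS =====

-- what aOuter does after its inner loop has returned gc
def aPost (p : List Int) (n m : Int) (fo : Nat) (gc : Int × Int) (prev mstops : Int) : Int :=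
  if gc.1 < 0 ∧ gc.2 = prev + 1 then -1
  else
    aOuter p n m fo (if gc.1 < 0 then gc.2 - 1 else gc.2)
      (if gc.1 < 0 then gc.2 - 1 else gc.2) (mstops + 1)

theorem aOuter_succ (p : List Int) (n m : Int) (fo : Nat) (prev curr mstops : Int) :
    aOuter p n m (fo + 1) prev curr mstops =
      if curr < n then aPost p n m fo (aInner p n (p.length + 1) m curr) prev mstops
      else mstops := rfl

theorem aInner_neg (p : List Int) (n : Int) (fi : Nat) (gas curr : Int) (h : gas < 0) :
    aInner p n fi gas curr = (gas, curr) := by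
  cases fi with
  | zero => rfl
  | succ t => simp [aInner]; omega

-- lockstep: A's inner loop position/remaining-fuel pair marches exactly as B's single
-- pass; refills correspond to A's back-off outer iterations, counts are offset by one.
theorem lockstep (p : List Int) (m : Int) (hm : 0 ≤ m) :
    ∀ (k fi fo : Nat) (gas curr prev mstops : Int),
      curr = (p.length : Int) - k → 1 ≤ curr → 0 ≤ gas → prev ≤ curr →
      (curr = prev → gas = m) → k + 1 ≤ fi → k + 2 ≤ fo →
      aPost p (p.length : Int) m fo (aInner p (p.length : Int) fi gas curr) prev mstops
        = bLoop p m k curr gas (mstops + 1) := by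
  intro k
  induction k with
  | zero =>
    intro fi fo gas curr prev mstops hcurr h1 hgas hpc hgm hfi hfo
    obtain ⟨t, rfl⟩ : ∃ t, fi = t + 1 := ⟨fi - 1, by omega⟩
    obtain ⟨s, rfl⟩ : ∃ s, fo = s + 1 := ⟨fo - 1, by omega⟩
    obtain ⟨s', rfl⟩ : ∃ s', s = s' + 1 := ⟨s - 1, by omega⟩
    have hnot : ¬ (0 ≤ gas ∧ curr < (p.length : Int)) := by omega
    simp only [aInner, if_neg hnot, aPost]
    have hng : ¬ (gas < 0 ∧ curr = prev + 1) := by omega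
    rw [if_neg hng]
    have hg : ¬ gas < 0 := by omega
    simp only [if_neg hg, aOuter_succ]
    rw [if_neg (by omega : ¬ curr < (p.length : Int))]
    simp [bLoop]
  | succ k ih =>
    intro fi fo gas curr prev mstops hcurr h1 hgas hpc hgm hfi hfo
    have hcn : curr < (p.length : Int) := by omega
    obtain ⟨t, rfl⟩ : ∃ t, fi = t + 1 := ⟨fi - 1, by omega⟩
    have hyes : (0 ≤ gas ∧ curr < (p.length : Int)) := ⟨hgas, hcn⟩
    simp only [aInner, if_pos hyes]
    generalize hgap : pvIdx p curr - pvIdx p (curr - 1) = gap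
    by_cases h2 : 0 ≤ gas - gap
    · -- tank covers this gap: both sides just advance
      rw [ih t fo (gas - gap) (curr + 1) prev mstops (by omega) (by omega) h2
        (by omega) (by omega) (by omega) (by omega)]
      simp only [bLoop, hgap]
      rw [if_neg (by omega : ¬ gas < gap)]
    · -- tank does not cover the gap
      rw [aInner_neg p _ t _ _ (by omega)]
      by_cases hep : curr = prev
      · -- A: just refilled and still short ⇒ -1;  B: m < gap ⇒ -1
        have hgm' : gas = m := hgm hep
        simp only [aPost]
        rw [if_pos (by constructor <;> omega)]
        simp only [bLoop, hgap]
        rw [if_pos (by omega : gas < gap), if_pos (by omega : m < gap)]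
      · -- A: back off one stop, refill there, re-drive the gap
        simp only [aPost]
        rw [if_neg (by omega : ¬ (gas - gap < 0 ∧ curr + 1 = prev + 1))]
        rw [if_pos (by omega : gas - gap < 0)]
        obtain ⟨s, rfl⟩ : ∃ s, fo = s + 1 := ⟨fo - 1, by omega⟩
        rw [show curr + 1 - 1 = curr from by omega, aOuter_succ, if_pos hcn]
        simp only [aInner, if_pos (show 0 ≤ m ∧ curr < (p.length : Int) from ⟨hm, hcn⟩)]
        rw [hgap]
        by_cases h3 : m < gap
        · -- even a full tank cannot cover the gap ⇒ both -1
          rw [aInner_neg p _ p.length _ _ (by omega)]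
          simp only [aPost]
          rw [if_pos ⟨by omega, trivial⟩]
          simp only [bLoop, hgap]
          rw [if_pos (by omega : gas < gap), if_pos h3]
        · -- refill at the previous stop and continue in lockstep
          have hLk : k + 1 ≤ p.length := by omega
          rw [ih p.length s (m - gap) (curr + 1) curr (mstops + 1) (by omega) (by omega)
            (by omega) (by omega) (by omega) hLk (by omega)]
          simp only [bLoop, hgap]
          rw [if_pos (by omega : gas < gap), if_neg h3]

-- ===== VERDICT (by name: the statement is the Claim_ definition above) =====
theorem main_general (p : List Int) (m : Int) (hm : 0 ≤ m) (hplen : 2 ≤ p.length) :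
    aOuter p (p.length : Int) m (p.length + 2) 0 1 (-1) = bLoop p m (p.length - 1) 1 m 0 := by
  obtain ⟨s, hs⟩ : ∃ s, p.length + 2 = s + 1 := ⟨p.length + 1, rfl⟩
  rw [hs, aOuter_succ, if_pos (by omega : (1 : Int) < (p.length : Int))]
  have := lockstep p m hm (p.length - 1) (p.length + 1) s
    m 1 0 (-1) (by omega) (by omega) hm (by omega)
    (by omega) (by omega) (by omega)
  norm_num at this
  rw [this]

theorem compute_min_number_of_refills_spec : Claim_equal_compute_min_number_of_refills := by
  intro d m stops _hdom hpre
  obtain ⟨_, _, hm1, _, hlen, _, _, _, _⟩ := hpre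
  unfold Spec_compute_min_number_of_refills
  simp only [compute_min_number_of_refills, compute_min_number_of_refills_alt]
  exact main_general (0 :: (stops ++ [d])) m (by omega) (by simp)
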